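-- pv_equiv track=rewrite | github.com/carlosdavid1234/TFG_UMA_Chess_Detector | src/utils.py | correct_fen
-- ===== SOURCE A (Python) =====
-- def correct_fen(fen):
--     corrected_fen = []
--     for rank in fen.split('/'):
--         corrected_rank = []
--         empty_count = 0
--         for char in rank:
--             if char.isdigit():
--                 empty_count += int(char)
--             else:
--                 if empty_count > 0:
--                     corrected_rank.append(str(empty_count))
--                     empty_count = 0
--                 corrected_rank.append(char)
--         if empty_count > 0:
--             corrected_rank.append(str(empty_count))
--         corrected_fen.append(''.join(corrected_rank))
--     return '/'.join(corrected_fen)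
-- ===== SOURCE B (Python) =====
-- def correct_fen(fen):
--     def fix(rank):
--         out = []
--         i = 0
--         n = len(rank)
--         while i < n:
--             j = i
--             if rank[i].isdigit():
--                 while j < n and rank[j].isdigit():
--                     j += 1
--                 total = sum(int(c) for c in rank[i:j])
--                 if total > 0:
--                     out.append(str(total))
--             else:
--                 while j < n and not rank[j].isdigit():
--                     j += 1
--                 out.append(rank[i:j])
--             i = j
--         return ''.join(out)
--     return '/'.join(fix(r) for r in fen.split('/'))
-- ===== Notes on version B (the rewrite author's own statement) =====
-- stated objective: alternative
-- what changed: Replaces A's per-character state machine (pending empty_count carried through the loop and flushed before each piece and at rank end) with a run-based scan: each rank is partitioned into maximal digit / non-digit runs with two pointers, digit runs are summed and emitted at once (suppressed when the sum is 0), non-digit runs are copied verbatim.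
import Mathlib
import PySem

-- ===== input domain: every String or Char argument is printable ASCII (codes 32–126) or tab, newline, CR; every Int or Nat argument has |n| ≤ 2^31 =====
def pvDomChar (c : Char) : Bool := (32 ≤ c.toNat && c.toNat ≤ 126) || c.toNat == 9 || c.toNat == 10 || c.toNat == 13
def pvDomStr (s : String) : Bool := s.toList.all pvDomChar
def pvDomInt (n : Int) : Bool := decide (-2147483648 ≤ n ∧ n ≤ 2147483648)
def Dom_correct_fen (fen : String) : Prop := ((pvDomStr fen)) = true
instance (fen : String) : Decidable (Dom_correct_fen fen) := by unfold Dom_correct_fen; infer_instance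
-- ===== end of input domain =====

-- B replaces A's per-character pending-count state machine with a run-based scan
-- (maximal digit / non-digit runs, digit runs summed and emitted at once); same cost, alternative structure.

-- ===== PORT A =====
-- int(char) under the `char.isdigit()` guard: PySem.Int.ofChars? [c] always succeeds there, `.getD 0` never fires.
def pvDigitVal (c : Char) : Int := (PySem.Int.ofChars? [c]).getD 0

def pvFixRankA (cs : List Char) : List Char :=
  let st := cs.foldl (fun (st : List Char × Int) c =>
    if PySem.Chars.isdigit c then
      (st.1, st.2 + pvDigitVal c)
    else
      ((if st.2 > 0 then st.1 ++ PySem.Int.toChars st.2 else st.1) ++ [c], 0))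
    ([], 0)
  if st.2 > 0 then st.1 ++ PySem.Int.toChars st.2 else st.1

def correct_fen (fen : String) : String :=
  String.ofList (PySem.Chars.join "/".toList ((PySem.Chars.splitOn fen.toList "/".toList).map pvFixRankA))

-- ===== PORT B =====
-- run-based scan: take the maximal run sharing the head's digit-ness, process it, recurse on the rest
def pvFixRankB : List Char → List Char
  | [] => []
  | c :: cs =>
    if PySem.Chars.isdigit c then
      let run := (c :: cs).takeWhile PySem.Chars.isdigit
      let rest := (c :: cs).dropWhile PySem.Chars.isdigit
      let total := (run.map pvDigitVal).sum
      (if total > 0 then PySem.Int.toChars total else []) ++ pvFixRankB rest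
    else
      let run := (c :: cs).takeWhile (fun d => !PySem.Chars.isdigit d)
      let rest := (c :: cs).dropWhile (fun d => !PySem.Chars.isdigit d)
      run ++ pvFixRankB rest
  termination_by cs => cs.length
  decreasing_by
  · simp only [List.dropWhile_cons, *]
    simpa using Nat.lt_succ_of_le (List.length_dropWhile_le _ _)
  · simp only [List.dropWhile_cons, *]
    simpa using Nat.lt_succ_of_le (List.length_dropWhile_le _ _)

def correct_fen_alt (fen : String) : String :=
  String.ofList (PySem.Chars.join "/".toList ((PySem.Chars.splitOn fen.toList "/".toList).map pvFixRankB))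

-- ===== PRECONDITION & SPEC =====
def Spec_correct_fen (fen : String) (out : String) : Prop := out = correct_fen_alt fen
instance (fen : String) (out : String) : Decidable (Spec_correct_fen fen out) := by unfold Spec_correct_fen; infer_instance

-- ===== CLAIM (what is proved, stated in full; the proofs are below) =====
def Claim_equal_correct_fen : Prop := ∀ (fen : String), Dom_correct_fen fen → Spec_correct_fen fen (correct_fen fen)

-- ===== LEMMAS AND PROOFS =====

def pvEmit (n : Int) : List Char := if n > 0 then PySem.Int.toChars n else []

-- A's algorithm restructured: G n cs = what A's inner loop produces starting with pending count n
def pvG (n : Int) : List Char → List Char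
  | [] => pvEmit n
  | c :: cs =>
    if PySem.Chars.isdigit c then pvG (n + pvDigitVal c) cs
    else pvEmit n ++ [c] ++ pvG 0 cs

theorem pvFixA_eq_G (cs : List Char) : ∀ (acc : List Char) (n : Int),
    (let st := cs.foldl (fun (st : List Char × Int) c =>
       if PySem.Chars.isdigit c then
         (st.1, st.2 + pvDigitVal c)
       else
         ((if st.2 > 0 then st.1 ++ PySem.Int.toChars st.2 else st.1) ++ [c], 0))
       (acc, n)
     if st.2 > 0 then st.1 ++ PySem.Int.toChars st.2 else st.1) = acc ++ pvG n cs := by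
  induction cs with
  | nil => intro acc n; simp [pvG, pvEmit]; split <;> simp
  | cons c cs ih =>
    intro acc n
    simp only [List.foldl_cons, pvG]
    by_cases h : PySem.Chars.isdigit c = true
    · simp [h, ih]
    · simp [h, ih, pvEmit, List.append_assoc]
      split <;> simp

theorem pvG_digits (ds : List Char) : ∀ (n : Int) (rest : List Char),
    (∀ d ∈ ds, PySem.Chars.isdigit d = true) →
    (rest = [] ∨ ∃ r rs, rest = r :: rs ∧ PySem.Chars.isdigit r = false) →
    pvG n (ds ++ rest) = pvEmit (n + (ds.map pvDigitVal).sum) ++ pvG 0 rest := by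
  induction ds with
  | nil =>
    intro n rest _ hrest
    rcases hrest with rfl | ⟨r, rs, rfl, hr⟩
    · simp [pvG, pvEmit]
    · simp [pvG, hr, pvEmit]
  | cons d ds ih =>
    intro n rest hd hrest
    have hdd := hd d (by simp)
    simp only [List.cons_append, pvG, hdd]
    rw [ih _ _ (fun x hx => hd x (by simp [hx])) hrest]
    simp only [List.map_cons, List.sum_cons, add_assoc]
    exact if_pos trivial

theorem pvG_nondigits (run : List Char) : ∀ (rest : List Char),
    (∀ d ∈ run, PySem.Chars.isdigit d = false) →
    pvG 0 (run ++ rest) = run ++ pvG 0 rest := by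
  induction run with
  | nil => simp
  | cons c cs ih =>
    intro rest h
    have hc := h c (by simp)
    simp only [List.cons_append, pvG, hc, Bool.false_eq_true, if_false, pvEmit]
    simp [ih rest (fun x hx => h x (by simp [hx]))]

theorem pvFixB_eq_G (cs : List Char) : pvFixRankB cs = pvG 0 cs := by
  induction hn : cs.length using Nat.strong_induction_on generalizing cs with
  | _ n ih =>
  match cs with
  | [] => simp [pvFixRankB, pvG, pvEmit]
  | c :: cs' =>
    by_cases h : PySem.Chars.isdigit c = true
    · rw [pvFixRankB]
      simp only [h]
      have hsplit : (c :: cs').takeWhile PySem.Chars.isdigit ++ (c :: cs').dropWhile PySem.Chars.isdigit = c :: cs' :=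
        List.takeWhile_append_dropWhile
      have hdig : ∀ d ∈ (c :: cs').takeWhile PySem.Chars.isdigit, PySem.Chars.isdigit d = true :=
        fun d hd => List.mem_takeWhile_imp hd
      have hrest : (c :: cs').dropWhile PySem.Chars.isdigit = [] ∨
          ∃ r rs, (c :: cs').dropWhile PySem.Chars.isdigit = r :: rs ∧ PySem.Chars.isdigit r = false := by
        cases hd : (c :: cs').dropWhile PySem.Chars.isdigit with
        | nil => exact Or.inl rfl
        | cons r rs =>
          refine Or.inr ⟨r, rs, rfl, ?_⟩
          have := List.head_dropWhile_not (p := PySem.Chars.isdigit) (l := c :: cs') (by simp [hd])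
          simpa [hd] using this
      have hlen : ((c :: cs').dropWhile PySem.Chars.isdigit).length < n := by
        rw [List.dropWhile_cons, if_pos h]
        subst hn
        simpa using Nat.lt_succ_of_le (List.length_dropWhile_le _ _)
      rw [ih _ hlen _ rfl]
      conv_rhs => rw [← hsplit]
      rw [pvG_digits _ 0 _ hdig hrest]
      simp [pvEmit]
    · rw [pvFixRankB]
      simp only [h, Bool.false_eq_true, if_false]
      have hB := Bool.not_eq_true (PySem.Chars.isdigit c)
      have hsplit : (c :: cs').takeWhile (fun d => !PySem.Chars.isdigit d) ++
          (c :: cs').dropWhile (fun d => !PySem.Chars.isdigit d) = c :: cs' :=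
        List.takeWhile_append_dropWhile
      have hnon : ∀ d ∈ (c :: cs').takeWhile (fun d => !PySem.Chars.isdigit d), PySem.Chars.isdigit d = false := by
        intro d hd
        have := List.mem_takeWhile_imp hd
        simpa using this
      have hlen : ((c :: cs').dropWhile (fun d => !PySem.Chars.isdigit d)).length < n := by
        rw [List.dropWhile_cons, if_pos (by simp [h])]
        subst hn
        simpa using Nat.lt_succ_of_le (List.length_dropWhile_le _ _)
      rw [ih _ hlen _ rfl]
      conv_rhs => rw [← hsplit]
      rw [pvG_nondigits _ _ hnon]

theorem pvFix_eq (cs : List Char) : pvFixRankA cs = pvFixRankB cs := by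
  rw [pvFixRankA, pvFixA_eq_G cs [] 0, pvFixB_eq_G]; simp

-- ===== VERDICT (by name: the statement is the Claim_ definition above) =====
theorem correct_fen_spec : Claim_equal_correct_fen := by
  intro fen _
  simp only [Spec_correct_fen, correct_fen, correct_fen_alt]
  rw [List.map_congr_left fun r _ => pvFix_eq r]
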